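-- pv_equiv track=rewrite | github.com/Sgewux/Clase-Programacion | calculadora_polinomios/polinomios/utils.py | reduccion_de_terminos_semejantes
-- ===== SOURCE A (Python) =====
-- def suma(arr):
--   '''
--   Recibe como parametro un arreglo de numeros y retorna la suma de los mismos.
--   '''
--   acumulado = 0
--   for i in arr:
--     acumulado += i
--   return acumulado
--
-- def ordenar(arr):
--   '''
--   Ordena los numeros en el arreglo. Es una implementacion de "qick sort"
--   '''
--   if len(arr) == 1 or len(arr) == 0:
--     return arr
--
--   pivote = arr[len(arr)//2]
--   menores = [i for i in arr if i<pivote]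
--   mayores = [i for i in arr if i>pivote]
--
--   return ordenar(menores) + [pivote] + ordenar(mayores)
--
-- def ordenar_polinomio(terminos, grados):
--   grados_ordenados = ordenar(grados.copy())[::-1]
--   terminos_ordenados = []
--   for grado in grados_ordenados:
--     termino_de_grado = terminos[grados.index(grado)] # El termino al cual  pertenecia ese grado
--     terminos_ordenados.append(termino_de_grado)
--
--   return terminos_ordenados, grados_ordenados
--
-- def encontrar_terminos_de_grado(terminos, grados, grado):
--   terminos_de_grado = []
--   for i in range(len(terminos)):
--     if grados[i] == grado:
--       terminos_de_grado.append(terminos[i])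
--   return terminos_de_grado
--
-- def reduccion_de_terminos_semejantes(terminos, grados):
--   nuevos_terminos = []
--   nuevos_grados = []
--
--   for grado in grados:
--     if grado not in nuevos_grados:
--       terminos_de_grado = encontrar_terminos_de_grado(terminos, grados, grado)
--       operacion = suma(terminos_de_grado)
--       if operacion != 0:
--         nuevos_terminos.append(operacion)
--         nuevos_grados.append(grado)
--
--   if nuevos_terminos and nuevos_grados: # Si la reduccion no dio 0
--     return ordenar_polinomio(nuevos_terminos, nuevos_grados)
--   else:
--     return [0], [0]
-- ===== SOURCE B (Python) =====
-- def reduccion_de_terminos_semejantes(terminos, grados):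
--   acumulado = {}
--   for t, g in zip(terminos, grados):
--     acumulado[g] = acumulado.get(g, 0) + t
--   pares = sorted(((g, c) for g, c in acumulado.items() if c != 0),
--                  key=lambda p: p[0], reverse=True)
--   if pares:
--     return [c for _, c in pares], [g for g, _ in pares]
--   else:
--     return [0], [0]
-- ===== Notes on version B (the rewrite author's own statement) =====
-- stated objective: faster
-- what changed: Replaces A's quadratic rescan-per-degree loop (plus a hand-written duplicate-dropping quicksort and list.index lookups) by a single dict-aggregation pass over zip(terminos, grados) followed by one descending sort of the (degree, coefficient) pairs.
import Mathlib
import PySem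

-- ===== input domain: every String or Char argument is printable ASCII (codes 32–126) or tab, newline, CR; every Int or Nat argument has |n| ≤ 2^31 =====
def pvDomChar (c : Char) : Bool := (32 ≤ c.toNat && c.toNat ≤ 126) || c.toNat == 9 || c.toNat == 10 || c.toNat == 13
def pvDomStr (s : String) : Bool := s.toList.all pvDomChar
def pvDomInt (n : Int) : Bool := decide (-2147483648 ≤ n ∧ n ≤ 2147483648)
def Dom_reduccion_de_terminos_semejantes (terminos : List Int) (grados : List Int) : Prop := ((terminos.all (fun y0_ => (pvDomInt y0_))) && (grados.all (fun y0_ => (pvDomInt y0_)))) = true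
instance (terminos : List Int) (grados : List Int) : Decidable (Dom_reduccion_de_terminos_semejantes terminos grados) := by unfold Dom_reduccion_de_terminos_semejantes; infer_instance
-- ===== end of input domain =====

-- B replaces A's quadratic rescan-per-degree loop and hand-written quicksort by one
-- dict-aggregation pass over zip(terminos, grados) plus a single descending sort (objective: faster).

-- ===== PORT A =====
def suma (arr : List Int) : Int :=
  arr.foldl (fun acumulado i => acumulado + i) 0

-- used by `ordenar` for termination: the pivot arr[len(arr)//2] is an element of arr
theorem pv_pivote_mem (arr : List Int) (h : arr.length ≠ 0) :
    PySem.List.pyGetD arr (PySem.Int.floordiv (arr.length : Int) 2) 0 ∈ arr := by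
  apply PySem.List.pyGetD_mem
  rw [PySem.Int.floordiv_eq_ediv_of_pos (by norm_num)]
  constructor <;> omega

def ordenar (arr : List Int) : List Int :=
  if arr.length = 1 ∨ arr.length = 0 then arr
  else
    -- arr[len(arr)//2]: the index is always in range here, so the default 0 is never used
    let pivote := PySem.List.pyGetD arr (PySem.Int.floordiv (arr.length : Int) 2) 0
    let menores := arr.filter (fun i => decide (i < pivote))
    let mayores := arr.filter (fun i => decide (pivote < i))
    ordenar menores ++ [pivote] ++ ordenar mayores
termination_by arr.length
decreasing_by
  all_goals
    have hm := pv_pivote_mem arr (by omega)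
    simp only [List.length_unattach]
    refine Nat.lt_of_lt_of_le ?_ (le_of_eq (List.length_attach (l := arr)))
    rw [List.length_filter_lt_length_iff_exists]
    exact ⟨⟨_, hm⟩, List.mem_attach _ _, by simp⟩

def ordenar_polinomio (terminos : List Int) (grados : List Int) : List Int × List Int :=
  -- grados.copy()[::-1]: slice? with step -1 never fails, the .getD [] default is never used
  let grados_ordenados := (PySem.List.slice? (ordenar grados) none none (-1)).getD []
  -- terminos[grados.index(grado)]: at every call site grado ∈ grados and the index is < len(terminos),
  -- so the .getD 0 defaults (Python: ValueError / IndexError) are never used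
  let terminos_ordenados := grados_ordenados.foldl
    (fun acc grado =>
      acc ++ [PySem.List.pyGetD terminos ((((PySem.List.index? grados grado).getD 0 : Nat) : Int)) 0]) []
  (terminos_ordenados, grados_ordenados)

def encontrar_terminos_de_grado (terminos : List Int) (grados : List Int) (grado : Int) : List Int :=
  -- grados[i]: Python raises IndexError when len(grados) < len(terminos); Pre_ excludes that,
  -- so the pyGetD defaults are never used
  (PySem.List.pyRange 0 (terminos.length : Int) 1).foldl
    (fun acc i =>
      if PySem.List.pyGetD grados i 0 = grado then acc ++ [PySem.List.pyGetD terminos i 0] else acc) []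

def reduccion_de_terminos_semejantes (terminos : List Int) (grados : List Int) : List Int × List Int :=
  let res := grados.foldl
    (fun (acc : List Int × List Int) grado =>
      if grado ∉ acc.2 then
        let terminos_de_grado := encontrar_terminos_de_grado terminos grados grado
        let operacion := suma terminos_de_grado
        if operacion ≠ 0 then (acc.1 ++ [operacion], acc.2 ++ [grado]) else acc
      else acc) ([], [])
  if res.1 ≠ [] ∧ res.2 ≠ [] then ordenar_polinomio res.1 res.2 else ([0], [0])

-- ===== PORT B =====
def reduccion_de_terminos_semejantes_alt (terminos : List Int) (grados : List Int) : List Int × List Int :=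
  let acumulado := (terminos.zip grados).foldl
    (fun (d : PySem.Dict Int Int) (p : Int × Int) => d.insert p.2 (d.getD p.2 0 + p.1)) PySem.Dict.empty
  let pares := PySem.List.sorted (acumulado.items.filter (fun p => decide (p.2 ≠ 0))) (fun p => p.1) true
  if pares ≠ [] then (pares.map (fun p => p.2), pares.map (fun p => p.1)) else ([0], [0])

-- ===== PRECONDITION & SPEC =====
-- A raises IndexError (grados[i] inside encontrar_terminos_de_grado) whenever
-- len(terminos) > len(grados) and grados is nonempty; Pre_ excludes exactly those inputs.
def Pre_reduccion_de_terminos_semejantes (terminos : List Int) (grados : List Int) : Prop :=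
  terminos.length ≤ grados.length ∨ grados = []
instance (terminos : List Int) (grados : List Int) : Decidable (Pre_reduccion_de_terminos_semejantes terminos grados) := by unfold Pre_reduccion_de_terminos_semejantes; infer_instance

def pvWitness_reduccion_de_terminos_semejantes : List Int × List Int := ([3, -3, 5], [2, 2, 1])

def Spec_reduccion_de_terminos_semejantes (terminos : List Int) (grados : List Int) (out : List Int × List Int) : Prop := out = reduccion_de_terminos_semejantes_alt terminos grados
instance (terminos : List Int) (grados : List Int) (out : List Int × List Int) : Decidable (Spec_reduccion_de_terminos_semejantes terminos grados out) := by unfold Spec_reduccion_de_terminos_semejantes; infer_instance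

-- ===== CLAIM (what is proved, stated in full; the proofs are below) =====
def Claim_equal_reduccion_de_terminos_semejantes : Prop := ∀ (terminos : List Int) (grados : List Int), Dom_reduccion_de_terminos_semejantes terminos grados → Pre_reduccion_de_terminos_semejantes terminos grados → Spec_reduccion_de_terminos_semejantes terminos grados (reduccion_de_terminos_semejantes terminos grados)

-- ===== LEMMAS AND PROOFS =====

-- the combined coefficient of degree g over the paired list
def pvS (z : List (Int × Int)) (g : Int) : Int :=
  ((z.filter (fun p => decide (p.2 = g))).map (·.1)).sum

theorem pvS_ne_zero_mem {z : List (Int × Int)} {g : Int} (h : pvS z g ≠ 0) :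
    g ∈ z.map (·.2) := by
  by_contra hg
  apply h
  unfold pvS
  have hnil : z.filter (fun p => decide (p.2 = g)) = [] := by
    rw [List.filter_eq_nil_iff]
    intro p hp
    simp only [decide_eq_true_eq]
    intro hpe
    exact hg (List.mem_map.mpr ⟨p, hp, hpe⟩)
  simp [hnil]

-- B's dictionary: lookup is the combined coefficient
theorem pv_getD_fold (l : List (Int × Int)) (d : PySem.Dict Int Int) (v : Int) :
    (l.foldl (fun (d : PySem.Dict Int Int) p => d.insert p.2 (d.getD p.2 0 + p.1)) d).getD v 0
      = d.getD v 0 + pvS l v := by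
  induction l generalizing d with
  | nil => simp [pvS]
  | cons p rest ih =>
    rw [List.foldl_cons, ih, PySem.Dict.getD_insert]
    unfold pvS
    rw [List.filter_cons]
    by_cases hv : v = p.2
    · subst hv
      simp only [decide_true, if_true, List.map_cons, List.sum_cons]
      ring
    · simp only [if_neg hv, decide_eq_true_eq]
      rw [if_neg (Ne.symm hv)]

-- A's accumulation loop, abstracted
def pvF (S : Int → Int) : List Int → List Int → List Int
  | ng, [] => ng
  | ng, g :: gs => if g ∈ ng ∨ S g = 0 then pvF S ng gs else pvF S (ng ++ [g]) gs

theorem pvF_nodup (S : Int → Int) (gs : List Int) : ∀ ng : List Int, ng.Nodup → (pvF S ng gs).Nodup := by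
  induction gs with
  | nil => intro ng h; simpa [pvF] using h
  | cons g gs ih =>
    intro ng h
    rw [pvF]
    split
    · exact ih ng h
    · next hc =>
      apply ih
      simp only [List.nodup_append, List.nodup_cons, List.nodup_nil]
      refine ⟨h, by simp, ?_⟩
      intro a ha b hb
      rcases List.mem_singleton.mp hb with rfl
      intro hag
      exact hc (Or.inl (hag ▸ ha))

theorem pvF_mem (S : Int → Int) (gs ng : List Int) (x : Int) :
    x ∈ pvF S ng gs ↔ x ∈ ng ∨ (x ∈ gs ∧ S x ≠ 0) := by
  induction gs generalizing ng with
  | nil => simp [pvF]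
  | cons g gs ih =>
    rw [pvF]
    split
    · next hc =>
      rw [ih]
      simp only [List.mem_cons]
      by_cases hxg : x = g
      · subst hxg; tauto
      · tauto
    · next hc =>
      rw [ih]
      simp only [List.mem_append, List.mem_cons]
      push Not at hc
      by_cases hxg : x = g
      · subst hxg; tauto
      · tauto

theorem pv_loop_eq_pvF (S : Int → Int) (gs : List Int) : ∀ ng : List Int,
    gs.foldl
      (fun (acc : List Int × List Int) g =>
        if g ∉ acc.2 then
          if S g ≠ 0 then (acc.1 ++ [S g], acc.2 ++ [g]) else acc
        else acc) (ng.map S, ng)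
      = ((pvF S ng gs).map S, pvF S ng gs) := by
  induction gs with
  | nil => intro ng; simp [pvF]
  | cons g gs ih =>
    intro ng
    rw [List.foldl_cons, pvF]
    by_cases h1 : g ∈ ng
    · rw [if_neg (by simpa using h1), if_pos (Or.inl h1)]
      exact ih ng
    · by_cases h2 : S g = 0
      · rw [if_pos (by simpa using h1), if_neg (by simpa using h2), if_pos (Or.inr h2)]
        exact ih ng
      · rw [if_pos (by simpa using h1), if_pos h2, if_neg (by tauto)]
        have hx := ih (ng ++ [g])
        rw [List.map_append] at hx
        exact hx

-- encontrar + suma compute the combined coefficient (when len terminos ≤ len grados)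
theorem pv_suma_encontrar (ts gs : List Int) (g : Int) (h : ts.length ≤ gs.length) :
    suma (encontrar_terminos_de_grado ts gs g) = pvS (ts.zip gs) g := by
  have hz : (ts.zip gs).length = ts.length := by rw [List.length_zip]; omega
  have hstep : encontrar_terminos_de_grado ts gs g
      = (ts.zip gs).foldl (fun acc p => if p.2 = g then acc ++ [p.1] else acc) [] := by
    unfold encontrar_terminos_de_grado
    rw [show (ts.length : Int) = ((ts.zip gs).length : Int) by rw [hz]]
    rw [← PySem.List.foldl_pyRange_zero_pyGetD' (ts.zip gs) ((0 : Int), (0 : Int))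
        (fun acc (p : Int × Int) => if p.2 = g then acc ++ [p.1] else acc) []]
    apply PySem.List.foldl_congr_mem
    intro acc i hi
    rcases PySem.List.mem_pyRange_one.mp hi with ⟨hi0, hi1⟩
    rw [hz] at hi1
    have hit : i.toNat < ts.length := by omega
    have hig : i.toNat < gs.length := by omega
    have hiz : i.toNat < (ts.zip gs).length := by omega
    rw [show i = ((i.toNat : Nat) : Int) from by omega]
    simp only [PySem.List.pyGetD_natCast]
    rw [List.getD_eq_getElem _ _ (by simpa using hig), List.getD_eq_getElem _ _ (by simpa using hit),
        List.getD_eq_getElem _ _ (by simpa using hiz)]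
    simp [List.getElem_zip]
  rw [hstep]
  rw [PySem.List.foldl_append_ite (p := fun (p : Int × Int) => p.2 = g) (f := fun (p : Int × Int) => p.1)]
  unfold suma pvS
  rw [PySem.List.foldl_add (g := fun (x : Int) => x)]
  simp [Function.comp_def]

-- quicksort on a duplicate-free list: a permutation, strictly sorted
theorem pv_perm_split (l : List Int) (p : Int) (hn : l.Nodup) (hp : p ∈ l) :
    l.Perm (l.filter (fun i => decide (i < p)) ++ p :: l.filter (fun i => decide (p < i))) := by
  rw [List.perm_iff_count]
  intro v
  rw [List.count_append, List.count_cons]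
  rcases lt_trichotomy v p with hv | rfl | hv
  · have e1 : (l.filter (fun i => decide (i < p))).count v = l.count v :=
      List.count_filter (by simpa using hv)
    have e2 : (l.filter (fun i => decide (p < i))).count v = 0 :=
      List.count_eq_zero.mpr (fun hvm => by have := List.of_mem_filter hvm; simp at this; omega)
    rw [e1, e2]
    simp [show ¬ p = v from by omega]
  · have e1 : (l.filter (fun i => decide (i < v))).count v = 0 :=
      List.count_eq_zero.mpr (fun hvm => by have := List.of_mem_filter hvm; simp at this)
    have e2 : (l.filter (fun i => decide (v < i))).count v = 0 :=
      List.count_eq_zero.mpr (fun hvm => by have := List.of_mem_filter hvm; simp at this)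
    rw [e1, e2, List.count_eq_one_of_mem hn hp]
    simp
  · have e1 : (l.filter (fun i => decide (i < p))).count v = 0 :=
      List.count_eq_zero.mpr (fun hvm => by have := List.of_mem_filter hvm; simp at this; omega)
    have e2 : (l.filter (fun i => decide (p < i))).count v = l.count v :=
      List.count_filter (by simpa using hv)
    rw [e1, e2]
    simp [show ¬ p = v from by omega]

theorem pv_ordenar_perm_aux : ∀ (n : Nat) (l : List Int), l.length ≤ n → l.Nodup → (ordenar l).Perm l := by
  intro n
  induction n with
  | zero =>
    intro l hl _
    have : l = [] := List.length_eq_zero_iff.mp (by omega)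
    subst this
    rw [ordenar]
    simp
  | succ n ih =>
    intro l hl hn
    rw [ordenar]
    split
    · exact List.Perm.refl l
    · next hc =>
      have hp := pv_pivote_mem l (by omega)
      set pivote := PySem.List.pyGetD l (PySem.Int.floordiv (l.length : Int) 2) 0 with hpiv
      have hlenm : (l.filter (fun i => decide (i < pivote))).length < l.length := by
        rw [List.length_filter_lt_length_iff_exists]
        exact ⟨pivote, hp, by simp⟩
      have hlenM : (l.filter (fun i => decide (pivote < i))).length < l.length := by
        rw [List.length_filter_lt_length_iff_exists]
        exact ⟨pivote, hp, by simp⟩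
      have h1 := ih (l.filter (fun i => decide (i < pivote))) (by omega) (hn.filter _)
      have h2 := ih (l.filter (fun i => decide (pivote < i))) (by omega) (hn.filter _)
      have hperm := pv_perm_split l pivote hn hp
      have hcat : (ordenar (l.filter (fun i => decide (i < pivote))) ++ [pivote]
            ++ ordenar (l.filter (fun i => decide (pivote < i)))).Perm
          (l.filter (fun i => decide (i < pivote)) ++ [pivote]
            ++ l.filter (fun i => decide (pivote < i))) :=
        (h1.append (List.Perm.refl [pivote])).append h2
      refine hcat.trans ?_
      rw [List.append_assoc, List.singleton_append]
      exact hperm.symm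

theorem ordenar_perm (l : List Int) (h : l.Nodup) : (ordenar l).Perm l :=
  pv_ordenar_perm_aux l.length l le_rfl h

theorem pv_ordenar_pairwise_aux : ∀ (n : Nat) (l : List Int), l.length ≤ n → l.Nodup →
    (ordenar l).Pairwise (· < ·) := by
  intro n
  induction n with
  | zero =>
    intro l hl _
    have : l = [] := List.length_eq_zero_iff.mp (by omega)
    subst this
    rw [ordenar]
    simp
  | succ n ih =>
    intro l hl hn
    rw [ordenar]
    split
    · next hc =>
      match l, hc with
      | [], _ => simp
      | [x], _ => simp
      | x :: y :: t, hc => simp at hc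
    · next hc =>
      have hp := pv_pivote_mem l (by omega)
      set pivote := PySem.List.pyGetD l (PySem.Int.floordiv (l.length : Int) 2) 0 with hpiv
      have hlenm : (l.filter (fun i => decide (i < pivote))).length < l.length := by
        rw [List.length_filter_lt_length_iff_exists]
        exact ⟨pivote, hp, by simp⟩
      have hlenM : (l.filter (fun i => decide (pivote < i))).length < l.length := by
        rw [List.length_filter_lt_length_iff_exists]
        exact ⟨pivote, hp, by simp⟩
      have h1 := ih (l.filter (fun i => decide (i < pivote))) (by omega) (hn.filter _)
      have h2 := ih (l.filter (fun i => decide (pivote < i))) (by omega) (hn.filter _)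
      have hm1 : ∀ x ∈ ordenar (l.filter (fun i => decide (i < pivote))), x < pivote := by
        intro x hx
        have := (pv_ordenar_perm_aux _ _ (le_refl _) (hn.filter _)).mem_iff.mp hx
        simpa using List.of_mem_filter this
      have hm2 : ∀ x ∈ ordenar (l.filter (fun i => decide (pivote < i))), pivote < x := by
        intro x hx
        have := (pv_ordenar_perm_aux _ _ (le_refl _) (hn.filter _)).mem_iff.mp hx
        simpa using List.of_mem_filter this
      rw [List.append_assoc, List.singleton_append, List.pairwise_append]
      refine ⟨h1, List.pairwise_cons.mpr ⟨hm2, h2⟩, ?_⟩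
      intro a ha b hb
      rcases List.mem_cons.mp hb with rfl | hb
      · exact hm1 a ha
      · exact (hm1 a ha).trans (hm2 b hb)

theorem ordenar_pairwise (l : List Int) (h : l.Nodup) : (ordenar l).Pairwise (· < ·) :=
  pv_ordenar_pairwise_aux l.length l le_rfl h

theorem pvS_ne_zero_mem_right {ts gs : List Int} {x : Int} (h : pvS (ts.zip gs) x ≠ 0) :
    x ∈ gs := by
  rcases List.mem_map.mp (pvS_ne_zero_mem h) with ⟨p, hp, hpe⟩
  exact hpe ▸ (List.of_mem_zip hp).2

theorem pv_lookup (N : List Int) (S : Int → Int) (g : Int) (hg : g ∈ N) :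
    PySem.List.pyGetD (N.map S) ((((PySem.List.index? N g).getD 0 : Nat) : Int)) 0 = S g := by
  have hne : PySem.List.index? N g ≠ none := fun hnone =>
    ((PySem.List.index?_eq_none_iff N g).mp hnone) hg
  obtain ⟨k, hk⟩ := Option.ne_none_iff_exists'.mp hne
  obtain ⟨hlt, hEq, -⟩ := PySem.List.getElem_of_index?_eq_some hk
  rw [hk]
  simp only [Option.getD_some, PySem.List.pyGetD_natCast]
  rw [List.getD_eq_getElem _ _ (by simpa using hlt)]
  simp [hEq]

def pvK (ts gs : List Int) : List Int := PySem.Set.ofList ((ts.zip gs).map (·.2))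

def pvM (ts gs : List Int) : List Int :=
  (pvK ts gs).filter (fun k => decide (pvS (ts.zip gs) k ≠ 0))

theorem pv_A_eq (ts gs : List Int) (h : ts.length ≤ gs.length) :
    reduccion_de_terminos_semejantes ts gs =
      (if pvF (pvS (ts.zip gs)) [] gs ≠ []
       then ordenar_polinomio ((pvF (pvS (ts.zip gs)) [] gs).map (pvS (ts.zip gs)))
              (pvF (pvS (ts.zip gs)) [] gs)
       else ([0], [0])) := by
  simp only [reduccion_de_terminos_semejantes]
  have hcong := PySem.List.foldl_congr_mem (l := gs)
      (init := (([] : List Int), ([] : List Int)))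
      (f := fun (acc : List Int × List Int) grado =>
        if grado ∉ acc.2 then
          if suma (encontrar_terminos_de_grado ts gs grado) ≠ 0 then
            (acc.1 ++ [suma (encontrar_terminos_de_grado ts gs grado)], acc.2 ++ [grado])
          else acc
        else acc)
      (g := fun (acc : List Int × List Int) grado =>
        if grado ∉ acc.2 then
          if pvS (ts.zip gs) grado ≠ 0 then (acc.1 ++ [pvS (ts.zip gs) grado], acc.2 ++ [grado])
          else acc
        else acc)
      (fun acc x _ => by simp only [pv_suma_encontrar ts gs x h])
  rw [hcong]
  have h0 := pv_loop_eq_pvF (pvS (ts.zip gs)) gs []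
  simp only [List.map_nil] at h0
  rw [h0]
  by_cases hN : pvF (pvS (ts.zip gs)) [] gs = []
  · simp [hN]
  · rw [if_pos ⟨by simpa [List.map_eq_nil_iff] using hN, hN⟩, if_pos hN]

theorem pv_B_eq (ts gs : List Int) :
    reduccion_de_terminos_semejantes_alt ts gs =
      (if PySem.List.sorted ((pvM ts gs).map (fun k => (k, pvS (ts.zip gs) k)))
            (fun p => p.1) true ≠ []
       then ((PySem.List.sorted ((pvM ts gs).map (fun k => (k, pvS (ts.zip gs) k)))
               (fun p => p.1) true).map (fun p => p.2),
             (PySem.List.sorted ((pvM ts gs).map (fun k => (k, pvS (ts.zip gs) k)))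
               (fun p => p.1) true).map (fun p => p.1))
       else ([0], [0])) := by
  simp only [reduccion_de_terminos_semejantes_alt]
  have hkeys : ((ts.zip gs).foldl
      (fun (d : PySem.Dict Int Int) p => d.insert p.2 (d.getD p.2 0 + p.1)) PySem.Dict.empty).keys
      = pvK ts gs := by
    rw [PySem.Dict.keys_foldl_insert_key]
    simp [pvK, PySem.Set.update_nil_left]
  have hnd : ((ts.zip gs).foldl
      (fun (d : PySem.Dict Int Int) p => d.insert p.2 (d.getD p.2 0 + p.1)) PySem.Dict.empty).keys.Nodup := by
    rw [hkeys]
    exact PySem.Set.nodup_ofList _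
  have hitems : ((ts.zip gs).foldl
      (fun (d : PySem.Dict Int Int) p => d.insert p.2 (d.getD p.2 0 + p.1)) PySem.Dict.empty).items
      = (pvK ts gs).map (fun k => (k, pvS (ts.zip gs) k)) := by
    rw [PySem.Dict.items_eq_map_keys _ hnd 0, hkeys]
    refine List.map_congr_left (fun k _ => ?_)
    rw [pv_getD_fold]
    simp
  rw [hitems, List.filter_map]
  rfl

-- the two outputs in the nonempty case coincide
theorem pv_main (ts gs : List Int) (h : ts.length ≤ gs.length) :
    reduccion_de_terminos_semejantes ts gs = reduccion_de_terminos_semejantes_alt ts gs := by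
  rw [pv_A_eq ts gs h, pv_B_eq ts gs]
  set S := pvS (ts.zip gs) with hSdef
  set N := pvF S [] gs with hNdef
  have hNnd : N.Nodup := pvF_nodup S gs [] List.nodup_nil
  have hNmem : ∀ x, x ∈ N ↔ (x ∈ gs ∧ S x ≠ 0) := fun x => by
    simpa using pvF_mem S gs [] x
  have hMnd : (pvM ts gs).Nodup := (PySem.Set.nodup_ofList _).filter _
  have hMmem : ∀ x, x ∈ pvM ts gs ↔ S x ≠ 0 := by
    intro x
    unfold pvM pvK
    rw [List.mem_filter]
    constructor
    · rintro ⟨-, hx⟩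
      simpa [hSdef] using hx
    · intro hx
      refine ⟨?_, by simpa [hSdef] using hx⟩
      simpa using pvS_ne_zero_mem (z := ts.zip gs) (g := x) hx
  have hperm : (pvM ts gs).Perm N := by
    rw [List.perm_ext_iff_of_nodup hMnd hNnd]
    intro a
    rw [hMmem a, hNmem a]
    exact ⟨fun ha => ⟨pvS_ne_zero_mem_right ha, ha⟩, fun ha => ha.2⟩
  by_cases hN : N = []
  · have hM : pvM ts gs = [] := by
      rw [hN] at hperm
      exact List.Perm.eq_nil hperm
    rw [if_neg (by simp [hN]), hM]
    simp [PySem.List.sorted_eq_nil_iff]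
  · rw [if_pos hN]
    set Q := (pvM ts gs).map (fun k => (k, S k)) with hQdef
    set pares := PySem.List.sorted Q (fun p : Int × Int => p.1) true with hparesdef
    have hparesperm : pares.Perm Q := PySem.List.sorted_perm Q (fun p => p.1) true
    have hfstperm : (pares.map (fun p : Int × Int => p.1)).Perm N := by
      refine (hparesperm.map _).trans ?_
      rw [hQdef, List.map_map]
      simpa [Function.comp_def] using hperm
    have hfstnd : (pares.map (fun p : Int × Int => p.1)).Nodup :=
      hfstperm.nodup_iff.mpr hNnd
    have hpw0 : pares.Pairwise (fun a b : Int × Int => b.1 ≤ a.1) :=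
      PySem.List.sorted_pairwise_rev Q (fun p => p.1)
    have hpwne : pares.Pairwise (fun a b : Int × Int => a.1 ≠ b.1) :=
      List.pairwise_map.mp hfstnd
    have hpw : pares.Pairwise (fun a b : Int × Int => b.1 < a.1) :=
      (hpw0.and hpwne).imp (fun hab => lt_of_le_of_ne hab.1 (Ne.symm hab.2))
    have hRperm : ((ordenar N).reverse).Perm N :=
      (List.reverse_perm _).trans (ordenar_perm N hNnd)
    have hRpw : ((ordenar N).reverse).Pairwise (fun a b => b < a) := by
      rw [List.pairwise_reverse]
      exact ordenar_pairwise N hNnd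
    have e1 : PySem.List.sorted N (fun x => x) true = (ordenar N).reverse :=
      PySem.List.sorted_rev_eq_of_perm_of_pairwise_gt N ((ordenar N).reverse) (fun x => x) hRperm hRpw
    have e2 : PySem.List.sorted N (fun x => x) true = pares.map (fun p : Int × Int => p.1) :=
      PySem.List.sorted_rev_eq_of_perm_of_pairwise_gt N (pares.map (fun p : Int × Int => p.1)) (fun x => x)
        hfstperm (List.pairwise_map.mpr hpw)
    have hR : pares.map (fun p : Int × Int => p.1) = (ordenar N).reverse := by
      rw [← e2, e1]
    have hpne : pares ≠ [] := by
      intro h0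
      apply hN
      have hQnil : Q = [] := (PySem.List.sorted_eq_nil_iff Q (fun p => p.1) true).mp (hparesdef ▸ h0)
      have hMnil : pvM ts gs = [] := List.map_eq_nil_iff.mp (hQdef ▸ hQnil)
      rw [hMnil] at hperm
      exact List.Perm.eq_nil hperm.symm
    rw [if_pos hpne]
    unfold ordenar_polinomio
    rw [PySem.List.slice?_none_none_neg_one]
    simp only [Option.getD_some]
    rw [PySem.List.foldl_append_singleton_eq_map]
    simp only [List.nil_append]
    refine Prod.ext ?_ hR.symm
    have hf : ∀ g ∈ (ordenar N).reverse,
        PySem.List.pyGetD (N.map S) ((((PySem.List.index? N g).getD 0 : Nat) : Int)) 0 = S g :=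
      fun g hg => pv_lookup N S g (hRperm.mem_iff.mp hg)
    rw [List.map_congr_left hf, ← hR, List.map_map]
    symm
    refine List.map_congr_left (fun p hp => ?_)
    rcases List.mem_map.mp ((PySem.List.mem_sorted Q (fun p : Int × Int => p.1) true p).mp hp) with ⟨k, -, rfl⟩
    rfl


-- ===== VERDICT (by name: the statement is the Claim_ definition above) =====
theorem reduccion_de_terminos_semejantes_spec : Claim_equal_reduccion_de_terminos_semejantes := by
  intro ts gs _ hpre
  unfold Spec_reduccion_de_terminos_semejantes
  rcases hpre with h | rfl
  · exact pv_main ts gs h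
  · have hb : reduccion_de_terminos_semejantes_alt ts [] = ([0], [0]) := by
      have hempty : (PySem.Dict.empty : PySem.Dict Int Int).items = [] := rfl
      simp [reduccion_de_terminos_semejantes_alt, List.zip_nil_right, hempty,
        PySem.List.sorted_eq_nil_iff]
    have ha : reduccion_de_terminos_semejantes ts [] = ([0], [0]) := by
      simp [reduccion_de_terminos_semejantes]
    rw [ha, hb]
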